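-- pv_equiv track=rewrite | github.com/miliar/Code_Jam_Webscraper | solutions_python/Problem_54/260.py | getMinimumSeconds
-- ===== SOURCE A (Python) =====
-- def gcd(a, b):
-- 	while True:
-- 		if a >= b:
-- 			a = a % b
-- 			if a == 0:
-- 				return b
-- 		else:
-- 			b = b % a
-- 			if b == 0:
-- 				return a
--
-- def gcdList(numbers):
-- 	cnt = len(numbers)
--
-- 	if cnt == 0:
-- 		return 1
-- 	elif cnt == 1:
-- 		return numbers[0]
-- 	else:
-- 		res = gcd(numbers[0], numbers[1])
-- 		for i in range(2, cnt):
-- 			res = gcd(res, numbers[i])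
-- 		return res
--
-- def getMinimumSeconds(numbers):
-- 	numbers.sort()
-- 	diffs = []
-- 	for i in range(len(numbers)-1):
-- 		d = numbers[i+1] - numbers[i]
-- 		if d != 0:
-- 			diffs.append(d)
--
-- 	g = gcdList(diffs)
-- 	m = numbers[0] % g
-- 	if m == 0:
-- 		return 0
-- 	else:
-- 		return g - m
-- ===== SOURCE B (Python) =====
-- def getMinimumSeconds(numbers):
--     x0 = numbers[0]
--     g = 0
--     for x in numbers:
--         a, b = g, abs(x - x0)
--         while b:
--             a, b = b, a % b
--         g = a
--     if g == 0:
--         return 0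
--     return (-x0) % g
-- ===== Notes on version B (the rewrite author's own statement) =====
-- stated objective: faster
-- what changed: Skips sorting and the adjacent-difference list entirely: one linear pass folds a gcd over the absolute difference of each element from the first element, then returns the negated first element mod g (0 when g is 0).
import Mathlib
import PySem

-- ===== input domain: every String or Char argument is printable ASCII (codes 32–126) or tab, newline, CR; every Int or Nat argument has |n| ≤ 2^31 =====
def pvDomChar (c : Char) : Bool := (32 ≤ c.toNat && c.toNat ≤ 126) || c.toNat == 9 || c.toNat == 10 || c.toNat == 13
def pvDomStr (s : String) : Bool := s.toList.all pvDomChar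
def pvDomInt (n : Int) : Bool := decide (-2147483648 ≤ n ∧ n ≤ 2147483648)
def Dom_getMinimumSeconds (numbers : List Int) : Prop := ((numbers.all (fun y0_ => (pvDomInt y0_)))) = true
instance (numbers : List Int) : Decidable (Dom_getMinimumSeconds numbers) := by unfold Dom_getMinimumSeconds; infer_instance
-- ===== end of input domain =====

-- B drops A's sort and adjacent-difference list: one linear gcd fold over |x - first element|, then (-first) % g.
-- A sorts its argument in place (observable mutation); B does not mutate: the equivalence proved is about the return value.

-- ===== PORT A =====
-- A's `gcd` is a `while True` loop; the fuel argument only makes it total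
-- (|a|+|b|+1 steps always suffice for the positive arguments A feeds it).
def pyGcdLoop (fuel : Nat) (a b : Int) : Int :=
  match fuel with
  | 0 => 0
  | fuel + 1 =>
    if a ≥ b then
      let a' := PySem.Int.mod a b
      if a' = 0 then b else pyGcdLoop fuel a' b
    else
      let b' := PySem.Int.mod b a
      if b' = 0 then a else pyGcdLoop fuel a b'

def pyGcd (a b : Int) : Int := pyGcdLoop (a.natAbs + b.natAbs + 1) a b

def gcdList (numbers : List Int) : Int :=
  let cnt : Int := numbers.length
  if cnt = 0 then 1
  else if cnt = 1 then PySem.List.pyGetD numbers 0 0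
  else
    let res := pyGcd (PySem.List.pyGetD numbers 0 0) (PySem.List.pyGetD numbers 1 0)
    (PySem.List.pyRange 2 cnt).foldl (fun res i => pyGcd res (PySem.List.pyGetD numbers i 0)) res

def getMinimumSeconds (numbers : List Int) : Int :=
  let s := PySem.List.sorted numbers (fun x => x) false
  let diffs := (PySem.List.pyRange 0 ((s.length : Int) - 1)).foldl
      (fun diffs i =>
        let d := PySem.List.pyGetD s (i + 1) 0 - PySem.List.pyGetD s i 0
        if d ≠ 0 then diffs ++ [d] else diffs) []
  let g := gcdList diffs
  let m := PySem.Int.mod (PySem.List.pyGetD s 0 0) g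
  if m = 0 then 0 else g - m

-- ===== PORT B =====
-- Source B's inner `while b: a, b = b, a % b` loop (terminates: |b| strictly decreases).
def euclid (a b : Int) : Int :=
  if hb : b = 0 then a else euclid b (PySem.Int.mod a b)
termination_by b.natAbs
decreasing_by
  rcases lt_or_gt_of_ne hb with h | h
  · have := PySem.Int.mod_neg_bounds a h
    omega
  · have h1 := PySem.Int.mod_nonneg a h
    have h2 := PySem.Int.mod_lt a h
    omega

def getMinimumSeconds_alt (numbers : List Int) : Int :=
  let x0 := PySem.List.pyGetD numbers 0 0
  let g := numbers.foldl (fun g x => euclid g |x - x0|) 0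
  if g = 0 then 0 else PySem.Int.mod (-x0) g

-- ===== PRECONDITION & SPEC =====
-- A indexes the first element: on the empty list it raises IndexError (B raises there too).
def Pre_getMinimumSeconds (numbers : List Int) : Prop := numbers ≠ []
instance (numbers : List Int) : Decidable (Pre_getMinimumSeconds numbers) := by unfold Pre_getMinimumSeconds; infer_instance
def pvWitness_getMinimumSeconds : List Int := [3, 7, 19]

def Spec_getMinimumSeconds (numbers : List Int) (out : Int) : Prop := out = getMinimumSeconds_alt numbers
instance (numbers : List Int) (out : Int) : Decidable (Spec_getMinimumSeconds numbers out) := by unfold Spec_getMinimumSeconds; infer_instance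

-- ===== CLAIM (what is proved, stated in full; the proofs are below) =====
def Claim_equal_getMinimumSeconds : Prop := ∀ (numbers : List Int), Dom_getMinimumSeconds numbers → Pre_getMinimumSeconds numbers → Spec_getMinimumSeconds numbers (getMinimumSeconds numbers)

-- ===== LEMMAS AND PROOFS =====

-- adjacent differences of a list, structurally
def adjOf (s : List Int) : List Int := (s.zip s.tail).map (fun p => p.2 - p.1)

theorem adjOf_cons (a b : Int) (t : List Int) :
    adjOf (a :: b :: t) = (b - a) :: adjOf (b :: t) := by
  simp [adjOf]

-- divisor characterisation of a gcd fold
theorem dvd_gcd_foldl {α : Type} (f : α → Nat) (d : Nat) :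
    ∀ (l : List α) (g : Nat),
      (d ∣ l.foldl (fun n x => Nat.gcd n (f x)) g ↔ d ∣ g ∧ ∀ x ∈ l, d ∣ f x) := by
  intro l
  induction l with
  | nil => simp
  | cons a t ih =>
    intro g
    simp only [List.foldl_cons, ih, List.mem_cons]
    constructor
    · rintro ⟨hg, hall⟩
      have h1 := Nat.dvd_trans hg (Nat.gcd_dvd_left _ _)
      have h2 := Nat.dvd_trans hg (Nat.gcd_dvd_right _ _)
      exact ⟨h1, fun x hx => hx.elim (fun e => e ▸ h2) (hall x)⟩
    · rintro ⟨hg, hall⟩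
      exact ⟨Nat.dvd_gcd hg (hall a (Or.inl rfl)), fun x hx => hall x (Or.inr hx)⟩

theorem euclid_eq : ∀ (n : Nat) (a b : Int), b.natAbs ≤ n → 0 ≤ a → 0 ≤ b →
    euclid a b = ((Int.gcd a b : Nat) : Int) := by
  intro n
  induction n with
  | zero =>
    intro a b hn ha hb
    have hb0 : b = 0 := by omega
    subst hb0
    rw [euclid]
    simp only [dite_true, Int.gcd_zero_right, Int.natCast_natAbs]
    exact (abs_of_nonneg ha).symm
  | succ n ih =>
    intro a b hn ha hb
    rw [euclid]
    by_cases hb0 : b = 0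
    · subst hb0
      simp only [dite_true, Int.gcd_zero_right, Int.natCast_natAbs]
      exact (abs_of_nonneg ha).symm
    · simp only [hb0, dite_false]
      have hbpos : 0 < b := by omega
      have hm := PySem.Int.mod_eq_emod_of_pos hbpos (a := a)
      have h1 := Int.emod_nonneg a (by omega : b ≠ 0)
      have h2 := Int.emod_lt_of_pos a hbpos
      rw [ih b (PySem.Int.mod a b) (by rw [hm]; omega) hb (by rw [hm]; omega)]
      rw [hm]
      congr 1
      rw [Int.gcd_comm, Int.gcd_emod]

theorem alt_fold_eq (x0 : Int) : ∀ (l : List Int) (g : Nat),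
    l.foldl (fun g x => euclid g |x - x0|) ((g : Nat) : Int)
      = ((l.foldl (fun n x => Nat.gcd n (x - x0).natAbs) g : Nat) : Int) := by
  intro l
  induction l with
  | nil => simp
  | cons a t ih =>
    intro g
    simp only [List.foldl_cons]
    have he : euclid ((g : Nat) : Int) |a - x0| = ((Nat.gcd g (a - x0).natAbs : Nat) : Int) := by
      rw [euclid_eq |a - x0|.natAbs _ _ le_rfl (by positivity) (abs_nonneg _)]
      congr 1
      simp [Int.gcd, Int.natAbs_abs]
    rw [he, ih]

theorem pyGcdLoop_eq : ∀ (fuel : Nat) (a b : Int), 0 < a → 0 < b →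
    a.natAbs + b.natAbs ≤ fuel → pyGcdLoop fuel a b = ((Int.gcd a b : Nat) : Int) := by
  intro fuel
  induction fuel with
  | zero => intro a b ha hb hf; omega
  | succ fuel ih =>
    intro a b ha hb hf
    rw [pyGcdLoop]
    by_cases hab : a ≥ b
    · simp only [hab, if_true]
      have hm := PySem.Int.mod_eq_emod_of_pos hb (a := a)
      have h1 := Int.emod_nonneg a (by omega : b ≠ 0)
      have h2 := Int.emod_lt_of_pos a hb
      by_cases hz : PySem.Int.mod a b = 0
      · simp only [hz, if_true]
        have hdvd : b ∣ a := ((PySem.Int.mod_eq_zero_iff_dvd a b).1 hz)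
        have : Int.gcd a b = b.natAbs := Int.gcd_eq_natAbs_right hdvd
        rw [this]; omega
      · simp only [hz, if_false]
        rw [ih (PySem.Int.mod a b) b (by omega) hb (by omega)]
        rw [hm, Int.gcd_emod]
    · simp only [hab, if_false]
      have halt : a < b := by omega
      have hm := PySem.Int.mod_eq_emod_of_pos ha (a := b)
      have h1 := Int.emod_nonneg b (by omega : a ≠ 0)
      have h2 := Int.emod_lt_of_pos b ha
      by_cases hz : PySem.Int.mod b a = 0
      · simp only [hz, if_true]
        have hdvd : a ∣ b := ((PySem.Int.mod_eq_zero_iff_dvd b a).1 hz)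
        have : Int.gcd a b = a.natAbs := Int.gcd_eq_natAbs_left hdvd
        rw [this]; omega
      · simp only [hz, if_false]
        rw [ih a (PySem.Int.mod b a) ha (by omega) (by omega)]
        rw [hm, Int.gcd_comm, Int.gcd_emod, Int.gcd_comm]

theorem pyGcd_eq (a b : Int) (ha : 0 < a) (hb : 0 < b) :
    pyGcd a b = ((Int.gcd a b : Nat) : Int) :=
  pyGcdLoop_eq _ a b ha hb (by omega)

theorem pyGcd_chain : ∀ (l : List Int), (∀ x ∈ l, 0 < x) → ∀ (n : Nat), 0 < n →
    l.foldl (fun r x => pyGcd r x) ((n : Nat) : Int)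
      = ((l.foldl (fun r x => Nat.gcd r x.natAbs) n : Nat) : Int) := by
  intro l
  induction l with
  | nil => intro _ n _; simp
  | cons a t ih =>
    intro hpos n hn
    simp only [List.foldl_cons]
    have hapos : 0 < a := hpos a (List.mem_cons_self)
    have : pyGcd ((n : Nat) : Int) a = ((Nat.gcd n a.natAbs : Nat) : Int) := by
      rw [pyGcd_eq _ _ (by exact_mod_cast hn) hapos]
      congr 1
    rw [this, ih (fun x hx => hpos x (List.mem_cons_of_mem a hx)) _
      (Nat.gcd_pos_of_pos_left _ hn)]

theorem gcdList_eq (l : List Int) (hpos : ∀ x ∈ l, 0 < x) (hne : l ≠ []) :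
    gcdList l = ((l.foldl (fun n x => Nat.gcd n x.natAbs) 0 : Nat) : Int) := by
  match l with
  | [d] =>
    have hd : 0 < d := hpos d (List.mem_cons_self)
    simp only [gcdList, List.length_cons, List.length_nil]
    norm_num
    exact (abs_of_nonneg (by omega)).symm
  | d0 :: d1 :: rest =>
    have hd0 : 0 < d0 := hpos d0 (by simp)
    have hd1 : 0 < d1 := hpos d1 (by simp)
    unfold gcdList
    have hlen : ((d0 :: d1 :: rest).length : Int) ≠ 0 := by simp; omega
    have hlen1 : ((d0 :: d1 :: rest).length : Int) ≠ 1 := by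
      simp only [List.length_cons]; push_cast; omega
    simp only [hlen, if_false, hlen1]
    rw [PySem.List.foldl_pyRange_pyGetD' (d0 :: d1 :: rest) 0
      (fun r x => pyGcd r x) _ (by omega : (0:Int) ≤ 2)]
    have hg01 : PySem.List.pyGetD (d0 :: d1 :: rest) 0 0 = d0 := PySem.List.pyGetD_zero_cons _ _ _
    have hg1 : PySem.List.pyGetD (d0 :: d1 :: rest) 1 0 = d1 := by
      have := PySem.List.pyGetD_ofNat (d0 :: d1 :: rest) 1 0 (by simp)
      simpa using this
    rw [hg01, hg1]
    have hdrop : (d0 :: d1 :: rest).drop (2:Int).toNat = rest := rfl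
    rw [hdrop]
    have hres : pyGcd d0 d1 = ((Nat.gcd d0.natAbs d1.natAbs : Nat) : Int) := by
      rw [pyGcd_eq _ _ hd0 hd1]; rfl
    rw [hres, pyGcd_chain rest (fun x hx => hpos x (by simp [hx])) _
      (Nat.gcd_pos_of_pos_left _ (by omega))]
    simp only [List.foldl_cons, Nat.gcd_zero_left]

theorem map_filter_comm {α β : Type} (l : List α) (f : α → β) (p : β → Bool) :
    (l.filter (fun x => p (f x))).map f = (l.map f).filter p := by
  induction l with
  | nil => rfl
  | cons a t ih => by_cases h : p (f a) <;> simp [h, ih]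

-- A's diffs loop builds exactly the nonzero adjacent differences
theorem diffs_loop_eq (s : List Int) :
    (PySem.List.pyRange 0 ((s.length : Int) - 1)).foldl
      (fun diffs i =>
        if PySem.List.pyGetD s (i + 1) 0 - PySem.List.pyGetD s i 0 ≠ 0
        then diffs ++ [PySem.List.pyGetD s (i + 1) 0 - PySem.List.pyGetD s i 0]
        else diffs) []
    = (adjOf s).filter (fun d => d ≠ 0) := by
  have hmap : (PySem.List.pyRange 0 ((s.length : Int) - 1)).map
      (fun i => PySem.List.pyGetD s (i + 1) 0 - PySem.List.pyGetD s i 0) = adjOf s := by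
    rw [PySem.List.pyRange_one]
    rw [List.map_map]
    apply List.ext_getElem
    · simp [adjOf]
    · intro k h1 h2
      simp only [List.getElem_map, List.getElem_range, Function.comp]
      have hk : k + 1 < s.length := by
        simp at h1; omega
      have e1 : PySem.List.pyGetD s ((0 : Int) + (k : Nat) + 1) 0 = s[k + 1] := by
        have := PySem.List.pyGetD_ofNat s (k + 1) 0 hk
        rw [← this]; congr 1; push_cast; ring
      have e2 : PySem.List.pyGetD s ((0 : Int) + (k : Nat)) 0 = s[k] := by
        have := PySem.List.pyGetD_ofNat s k 0 (by omega)
        rw [← this]; congr 1; omega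
      rw [e1, e2]
      simp [adjOf, List.getElem_zip, List.getElem_tail]
  have hfun : (fun (diffs : List Int) (i : Int) =>
        if PySem.List.pyGetD s (i + 1) 0 - PySem.List.pyGetD s i 0 ≠ 0
        then diffs ++ [PySem.List.pyGetD s (i + 1) 0 - PySem.List.pyGetD s i 0]
        else diffs)
      = (fun diffs i =>
        if (fun i => decide (PySem.List.pyGetD s (i + 1) 0 - PySem.List.pyGetD s i 0 ≠ 0)) i = true
        then diffs ++ [(fun i => PySem.List.pyGetD s (i + 1) 0 - PySem.List.pyGetD s i 0) i]
        else diffs) := by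
    funext diffs i
    simp
  rw [hfun]
  rw [PySem.List.foldl_append_if
    (fun i => decide (PySem.List.pyGetD s (i + 1) 0 - PySem.List.pyGetD s i 0 ≠ 0))
    (fun i => PySem.List.pyGetD s (i + 1) 0 - PySem.List.pyGetD s i 0)]
  rw [List.nil_append, ← hmap]
  exact map_filter_comm (PySem.List.pyRange 0 ((s.length : Int) - 1))
    (fun i => PySem.List.pyGetD s (i + 1) 0 - PySem.List.pyGetD s i 0) (fun d => decide (d ≠ 0))

-- telescoping: common divisors of the adjacent differences are the common divisors of the offsets from the head
theorem adj_dvd_iff : ∀ (t : List Int) (h d : Int),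
    (∀ y ∈ adjOf (h :: t), d ∣ y) ↔ (∀ x ∈ t, d ∣ (x - h)) := by
  intro t
  induction t with
  | nil => simp [adjOf]
  | cons b t' ih =>
    intro h d
    rw [adjOf_cons]
    simp only [List.mem_cons, forall_eq_or_imp]
    constructor
    · rintro ⟨hbh, hrest⟩
      refine ⟨hbh, fun x hx => ?_⟩
      have hxb := (ih b d).1 hrest x hx
      have : x - h = (x - b) + (b - h) := by ring
      rw [this]; exact dvd_add hxb hbh
    · rintro ⟨hbh, hrest⟩
      refine ⟨hbh, (ih b d).2 (fun x hx => ?_)⟩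
      have : x - b = (x - h) - (b - h) := by ring
      rw [this]; exact dvd_sub (hrest x hx) hbh

theorem base_change (l : List Int) (u v : Int) (hv : v ∈ l) (d : Int)
    (h : ∀ x ∈ l, d ∣ x - u) : ∀ x ∈ l, d ∣ x - v := by
  intro x hx
  have : x - v = (x - u) - (v - u) := by ring
  rw [this]; exact dvd_sub (h x hx) (h v hv)

-- master equivalence: divisors of A's filtered diffs list = divisors of B's offsets
theorem master_dvd_iff (numbers : List Int) (h : Int) (t : List Int) (x0 : Int)
    (hperm : (h :: t).Perm numbers) (hx0 : x0 ∈ numbers) (d : Int) :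
    (∀ y ∈ (adjOf (h :: t)).filter (fun y => y ≠ 0), d ∣ y) ↔ (∀ x ∈ numbers, d ∣ (x - x0)) := by
  have hfilter : (∀ y ∈ (adjOf (h :: t)).filter (fun y => y ≠ 0), d ∣ y)
      ↔ (∀ y ∈ adjOf (h :: t), d ∣ y) := by
    constructor
    · intro hf y hy
      by_cases hy0 : y = 0
      · subst hy0; exact dvd_zero d
      · exact hf y (List.mem_filter.2 ⟨hy, by simpa using hy0⟩)
    · intro hf y hy
      exact hf y (List.mem_filter.1 hy).1
  rw [hfilter, adj_dvd_iff]
  have hmem : ∀ x, x ∈ (h :: t) ↔ x ∈ numbers := fun x => hperm.mem_iff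
  have hh : h ∈ numbers := (hmem h).1 (List.mem_cons_self)
  constructor
  · intro hall
    have hall' : ∀ x ∈ numbers, d ∣ x - h := by
      intro x hx
      rcases List.mem_cons.1 ((hmem x).2 hx) with rfl | hx'
      · simp
      · exact hall x hx'
    exact base_change numbers h x0 hx0 d hall'
  · intro hall x hx
    have := base_change numbers x0 h hh d hall
    exact this x ((hmem x).1 (List.mem_cons_of_mem h hx))

-- sortedness gives nonnegative adjacent differences
theorem adj_nonneg : ∀ (s : List Int), s.Pairwise (· ≤ ·) → ∀ y ∈ adjOf s, 0 ≤ y := by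
  intro s
  induction s with
  | nil => simp [adjOf]
  | cons a t ih =>
    intro hp y hy
    match t with
    | [] => simp [adjOf] at hy
    | b :: t' =>
      rw [adjOf_cons] at hy
      rcases List.mem_cons.1 hy with rfl | hy'
      · have hab : a ≤ b := (List.pairwise_cons.1 hp).1 b (List.mem_cons_self)
        omega
      · exact ih (List.pairwise_cons.1 hp).2 y hy'

-- Nat-divisibility of natAbs ↔ Int-divisibility
theorem natAbs_dvd_iff (d : Nat) (x : Int) : d ∣ x.natAbs ↔ ((d : Nat) : Int) ∣ x :=
  (Int.ofNat_dvd_left).symm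

theorem negmod (a b : Int) (h : 0 < b) (hm : a % b ≠ 0) : (-a) % b = b - a % b := by
  have hlt := Int.emod_lt_of_pos a h
  have hge := Int.emod_nonneg a (by omega : b ≠ 0)
  have he : (-a) % b = (b - a % b) % b := by
    rw [Int.emod_eq_emod_iff_emod_sub_eq_zero]
    apply Int.emod_eq_zero_of_dvd
    have := Int.emod_def a b
    exact ⟨-(a/b) - 1, by rw [this]; ring⟩
  rw [he, Int.emod_eq_of_lt (by omega) (by omega)]

theorem modcong (a b c : Int) (h : b ∣ a - c) : a % b = c % b := by
  rw [Int.emod_eq_emod_iff_emod_sub_eq_zero]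
  exact Int.emod_eq_zero_of_dvd h

-- ===== VERDICT (by name: the statement is the Claim_ definition above) =====
theorem getMinimumSeconds_spec : Claim_equal_getMinimumSeconds := by
  intro numbers _hdom hpre
  unfold Spec_getMinimumSeconds
  simp only [getMinimumSeconds, getMinimumSeconds_alt]
  obtain ⟨n0, ns, rfl⟩ : ∃ a t, numbers = a :: t := by
    cases numbers with
    | nil => exact absurd rfl hpre
    | cons a t => exact ⟨a, t, rfl⟩
  rw [PySem.List.pyGetD_zero_cons]
  set G : Nat := (n0 :: ns).foldl (fun n x => Nat.gcd n (x - n0).natAbs) 0 with hG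
  have hBfold : (n0 :: ns).foldl (fun g x => euclid g |x - n0|) 0 = ((G : Nat) : Int) := by
    have := alt_fold_eq n0 (n0 :: ns) 0
    simp only [Nat.cast_zero] at this
    exact this
  rw [hBfold]
  -- characterisation of G
  have hGchar : ∀ d : Nat, d ∣ G ↔ ∀ x ∈ (n0 :: ns), ((d : Nat) : Int) ∣ x - n0 := by
    intro d
    rw [hG, dvd_gcd_foldl]
    simp only [Nat.dvd_zero, true_and]
    exact forall₂_congr (fun x _ => natAbs_dvd_iff d (x - n0))
  -- A's side: the sorted list
  obtain ⟨h, t, hse⟩ : ∃ h t, PySem.List.sorted (n0 :: ns) (fun x => x) false = h :: t := by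
    cases hsort : PySem.List.sorted (n0 :: ns) (fun x => x) false with
    | nil =>
      rw [PySem.List.sorted_eq_nil_iff] at hsort
      exact absurd hsort (by simp)
    | cons a b => exact ⟨a, b, rfl⟩
  rw [hse]
  have hperm : (h :: t).Perm (n0 :: ns) := hse ▸ PySem.List.sorted_perm (n0 :: ns) (fun x => x) false
  rw [diffs_loop_eq, PySem.List.pyGetD_zero_cons]
  set diffsA := (adjOf (h :: t)).filter (fun y => y ≠ 0) with hdiffsA
  have hn0mem : n0 ∈ (n0 :: ns) := List.mem_cons_self
  have hmaster := master_dvd_iff (n0 :: ns) h t n0 hperm hn0mem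
  rw [← hdiffsA] at hmaster
  -- diffs elements are positive
  have hpairwise : (h :: t).Pairwise (· ≤ ·) := by
    have := PySem.List.sorted_pairwise (n0 :: ns) (fun x => x)
    rw [hse] at this
    simpa using this
  have hpos : ∀ y ∈ diffsA, 0 < y := by
    intro y hy
    have hmem := List.mem_filter.1 hy
    have hnn := adj_nonneg (h :: t) hpairwise y hmem.1
    have : y ≠ 0 := by simpa using hmem.2
    omega
  by_cases hG0 : G = 0
  · -- all elements equal: diffsA is empty, both return 0
    have hall0 : ∀ x ∈ (n0 :: ns), x - n0 = 0 := by
      have := (hGchar 0).1 (hG0 ▸ dvd_refl G)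
      intro x hx
      simpa using this x hx
    have hempty : diffsA = [] := by
      rw [List.eq_nil_iff_forall_not_mem]
      intro y hy
      have hy0 : y = 0 := by
        have := (hmaster 0).2 (fun x hx => by simp [hall0 x hx]) y hy
        simpa using this
      have := hpos y hy
      omega
    rw [hempty]
    have hg1 : gcdList [] = 1 := by simp [gcdList]
    rw [hg1]
    have hm0 : PySem.Int.mod h 1 = 0 := (PySem.Int.mod_eq_zero_iff_dvd h 1).2 (one_dvd h)
    rw [hm0]
    simp [hG0]
  · -- G > 0
    have hGpos : 0 < G := Nat.pos_of_ne_zero hG0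
    have hdne : diffsA ≠ [] := by
      intro hnil
      apply hG0
      have hall : ∀ x ∈ (n0 :: ns), x - n0 = 0 := by
        intro x hx
        have := (hmaster 0).1 (by rw [hnil]; simp) x hx
        simpa using this
      have : (0 : Nat) ∣ G := by
        rw [hGchar 0]
        intro x hx
        simp [hall x hx]
      simpa using this
    -- A's gcd value equals G
    set GA : Nat := diffsA.foldl (fun n x => Nat.gcd n x.natAbs) 0 with hGA
    have hGAchar : ∀ d : Nat, d ∣ GA ↔ ∀ y ∈ diffsA, ((d : Nat) : Int) ∣ y := by
      intro d
      rw [hGA, dvd_gcd_foldl]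
      simp only [Nat.dvd_zero, true_and]
      exact forall₂_congr (fun y _ => natAbs_dvd_iff d y)
    have hGAG : GA = G := by
      apply Nat.dvd_antisymm
      · rw [hGchar]
        exact (hmaster GA).1 ((hGAchar GA).1 (dvd_refl GA))
      · rw [hGAchar]
        exact (hmaster G).2 ((hGchar G).1 (dvd_refl G))
    have hgl : gcdList diffsA = ((G : Nat) : Int) := by
      rw [gcdList_eq diffsA hpos hdne, ← hGA, hGAG]
    rw [hgl]
    have hGposI : (0 : Int) < ((G : Nat) : Int) := by exact_mod_cast hGpos
    -- h ≡ n0 (mod G)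
    have hhmem : h ∈ (n0 :: ns) := hperm.mem_iff.1 (List.mem_cons_self)
    have hcong : ((G : Nat) : Int) ∣ h - n0 :=
      ((hGchar G).1 (dvd_refl G)) h hhmem
    have hmod : PySem.Int.mod h ((G : Nat) : Int) = h % ((G : Nat) : Int) :=
      PySem.Int.mod_eq_emod_of_pos hGposI
    have hmodneg : PySem.Int.mod (-n0) ((G : Nat) : Int) = (-n0) % ((G : Nat) : Int) :=
      PySem.Int.mod_eq_emod_of_pos hGposI
    have hcongmod : h % ((G : Nat) : Int) = n0 % ((G : Nat) : Int) := modcong _ _ _ hcong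
    have hGne0 : ((G : Nat) : Int) ≠ 0 := by omega
    rw [if_neg hGne0]
    by_cases hm : n0 % ((G : Nat) : Int) = 0
    · have hA0 : PySem.Int.mod h ((G : Nat) : Int) = 0 := by rw [hmod, hcongmod, hm]
      have hB0 : (-n0) % ((G : Nat) : Int) = 0 :=
        Int.emod_eq_zero_of_dvd ((dvd_neg).2 (Int.dvd_of_emod_eq_zero hm))
      rw [hA0, hmodneg, hB0]
      simp
    · have hAne : PySem.Int.mod h ((G : Nat) : Int) ≠ 0 := by
        rw [hmod, hcongmod]; exact hm
      rw [if_neg hAne, hmod, hcongmod, hmodneg, negmod n0 _ hGposI hm]
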